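-- pv_equiv track=rewrite | github.com/ankurbhambri/DS-Algo | sliding-window/fixed-size/maximum-sum-of-distinct-subarrays-with-length-k.py | has_unique_window
-- ===== SOURCE A (Python) =====
-- def has_unique_window(nums, k):
--     seen = set()
--     l = 0
--     for r in range(len(nums)):
--         while nums[r] in seen:
--             seen.remove(nums[l])
--             l += 1
--         seen.add(nums[r])
--         if r - l + 1 == k:
--             return True
--     return False
-- ===== SOURCE B (Python) =====
-- def has_unique_window(nums, k):
--     if k < 1:
--         return False
--     count = {}
--     for r in range(len(nums)):
--         x = nums[r]
--         count[x] = count.get(x, 0) + 1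
--         if r >= k:
--             y = nums[r - k]
--             count[y] -= 1
--             if count[y] == 0:
--                 del count[y]
--         if r >= k - 1 and len(count) == k:
--             return True
--     return False
-- ===== Notes on version B (the rewrite author's own statement) =====
-- stated objective: alternative
-- what changed: Replaced A's variable-size two-pointer window (set with a conditional shrink-until-valid inner while) by a fixed-stride sliding window of exactly k elements backed by a frequency dict: each step adds the entering element, evicts the leaving one (deleting keys that drop to zero), and reports True when the k-window holds k distinct keys.
import Mathlib
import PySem

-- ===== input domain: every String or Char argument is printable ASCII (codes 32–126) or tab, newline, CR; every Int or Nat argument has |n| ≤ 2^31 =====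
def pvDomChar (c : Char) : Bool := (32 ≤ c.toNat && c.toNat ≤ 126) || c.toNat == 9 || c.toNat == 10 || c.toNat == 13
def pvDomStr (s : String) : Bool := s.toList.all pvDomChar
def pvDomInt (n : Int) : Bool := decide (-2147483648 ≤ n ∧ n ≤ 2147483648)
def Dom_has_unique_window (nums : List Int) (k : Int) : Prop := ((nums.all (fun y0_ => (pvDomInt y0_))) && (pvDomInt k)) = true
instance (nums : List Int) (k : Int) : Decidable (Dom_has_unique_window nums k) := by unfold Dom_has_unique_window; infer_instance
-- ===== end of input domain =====

-- B replaces A's two-pointer variable-size window (set + shrink-until-valid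
-- inner while) by a fixed-stride k-window backed by a frequency dict
-- (alternative decomposition, same O(n) cost).

-- ===== PORT A =====
-- the inner 'while nums[r] in seen: seen.remove(nums[l]); l += 1' loop;
-- terminates because removing a present element shrinks 'seen' (the Python
-- 'seen.remove' KeyError branch is unreachable: nums[l] is always in seen).
def pvShrinkA (nums : List Int) (x : Int) (seen : PySem.Set Int) (l : Nat) :
    PySem.Set Int × Nat :=
  if PySem.Set.contains seen x then
    match hm : PySem.Set.remove? seen (PySem.List.pyGetD nums (l : Int) 0) with
    | some s => pvShrinkA nums x s (l + 1)
    | none => (seen, l)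
  else (seen, l)
termination_by seen.length
decreasing_by
  have : PySem.Set.remove? seen (PySem.List.pyGetD nums (l : Int) 0) = some s := hm
  simp only [PySem.Set.remove?] at this
  split at this
  · cases this
    simp only [PySem.Set.discard]
    apply List.length_filter_lt_length_iff_exists.mpr
    have hx : PySem.List.pyGetD nums (l : Int) 0 ∈ seen :=
      (PySem.Set.contains_iff _ _).mp (by assumption)
    exact ⟨_, hx, by simp⟩
  · cases this

-- the outer 'for r in range(len(nums))' loop of A
def pvLoopA (nums : List Int) (k : Int) (r : Nat) (seen : PySem.Set Int) (l : Nat) : Bool :=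
  if h : r < nums.length then
    let x := PySem.List.pyGetD nums (r : Int) 0
    let p := pvShrinkA nums x seen l
    let seen' := PySem.Set.add p.1 x
    if (r : Int) - (p.2 : Int) + 1 == k then true
    else pvLoopA nums k (r + 1) seen' p.2
  else false
termination_by nums.length - r

def has_unique_window (nums : List Int) (k : Int) : Bool :=
  pvLoopA nums k 0 PySem.Set.empty 0

-- ===== PORT B =====
-- the 'for r in range(len(nums))' loop of B, carrying the frequency dict
def pvLoopB (nums : List Int) (k : Int) (r : Nat) (count : PySem.Dict Int Int) : Bool :=
  if h : r < nums.length then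
    let x := PySem.List.pyGetD nums (r : Int) 0
    let c1 := PySem.Dict.modify count x 0 (· + 1)
    let c2 :=
      if k ≤ (r : Int) then
        let y := PySem.List.pyGetD nums ((r : Int) - k) 0
        let c' := PySem.Dict.modify c1 y 0 (· - 1)
        if PySem.Dict.getD c' y 0 == 0 then PySem.Dict.erase c' y else c'
      else c1
    if k - 1 ≤ (r : Int) && ((PySem.Dict.size c2 : Int) == k) then true
    else pvLoopB nums k (r + 1) c2
  else false
termination_by nums.length - r

def has_unique_window_alt (nums : List Int) (k : Int) : Bool :=
  if k < 1 then false
  else pvLoopB nums k 0 PySem.Dict.empty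

-- ===== PRECONDITION & SPEC =====
def Spec_has_unique_window (nums : List Int) (k : Int) (out : Bool) : Prop := out = has_unique_window_alt nums k
instance (nums : List Int) (k : Int) (out : Bool) : Decidable (Spec_has_unique_window nums k out) := by unfold Spec_has_unique_window; infer_instance

-- ===== CLAIM (what is proved, stated in full; the proofs are below) =====
def Claim_equal_has_unique_window : Prop := ∀ (nums : List Int) (k : Int), Dom_has_unique_window nums k → Spec_has_unique_window nums k (has_unique_window nums k)

-- ===== LEMMAS AND PROOFS =====

-- window nums i j = the sublist nums[i:j]
def pvWin (nums : List Int) (i j : Nat) : List Int := (nums.drop i).take (j - i)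

theorem pvOfList_sublist (xs : List Int) : (PySem.Set.ofList xs).Sublist xs := by
  induction xs with
  | nil => simp [PySem.Set.ofList_nil]
  | cons x xs ih =>
    rw [PySem.Set.ofList_cons]
    exact List.Sublist.cons_cons x ((List.filter_sublist).trans ih)

theorem pvLenOfList (xs : List Int) :
    (PySem.Set.ofList xs).length = xs.length ↔ xs.Nodup := by
  constructor
  · intro h
    have := (pvOfList_sublist xs).eq_of_length h
    rw [← this]; exact PySem.Set.nodup_ofList xs
  · intro h; rw [PySem.Set.ofList_eq_self_of_nodup xs h]

theorem pvWin_len (nums : List Int) (i j : Nat) (h : j ≤ nums.length) :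
    (pvWin nums i j).length = j - i := by
  unfold pvWin; simp; omega

theorem pvWin_succ (nums : List Int) (l r : Nat) (h1 : l ≤ r) (h2 : r < nums.length) :
    pvWin nums l (r + 1) = pvWin nums l r ++ [nums.getD r 0] := by
  unfold pvWin
  have e1 : r + 1 - l = (r - l) + 1 := by omega
  rw [e1, List.take_add_one, List.getElem?_drop]
  have e2 : l + (r - l) = r := by omega
  rw [e2, List.getElem?_eq_getElem h2]
  simp [List.getD, List.getElem?_eq_getElem h2]

theorem pvWin_cons (nums : List Int) (l r : Nat) (h1 : l < r) (h2 : l < nums.length) :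
    pvWin nums l r = nums.getD l 0 :: pvWin nums (l + 1) r := by
  unfold pvWin
  rw [List.drop_eq_getElem_cons h2]
  have e : r - l = (r - (l + 1)) + 1 := by omega
  rw [e, List.take_succ_cons]
  simp [List.getD, List.getElem?_eq_getElem h2]

theorem pvWin_mono_not_nodup (nums : List Int) (j r : Nat)
    (h : ¬ (pvWin nums j r).Nodup) : ¬ (pvWin nums j (r + 1)).Nodup := by
  intro hn
  apply h
  have e : pvWin nums j r = (pvWin nums j (r + 1)).take (r - j) := by
    unfold pvWin
    rw [List.take_take]
    congr 1; omega
  rw [e]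
  exact hn.sublist (List.take_sublist _ _)

theorem pvConcat_nodup (w : List Int) (x : Int) (h1 : w.Nodup) (h2 : x ∉ w) :
    (w ++ [x]).Nodup := by
  simp [List.nodup_append, h1]
  intro a ha hax; rw [hax] at ha; exact h2 ha

theorem pvConcat_not_nodup (w : List Int) (x : Int) (h : x ∈ w) : ¬ (w ++ [x]).Nodup := by
  simp [List.nodup_append]
  intro _
  exact h

-- specification of the inner while loop (pvShrinkA) under the loop invariant
theorem pvShrink_spec (nums : List Int) (r : Nat) (hr : r < nums.length) :
    ∀ d l, r - l ≤ d → (pvWin nums l r).Nodup → l ≤ r →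
    (∀ j, j < l → ¬ (pvWin nums j (r + 1)).Nodup) →
    ∃ l', pvShrinkA nums (nums.getD r 0) (pvWin nums l r) l = (pvWin nums l' r, l') ∧
      l ≤ l' ∧ l' ≤ r ∧ (pvWin nums l' r).Nodup ∧
      nums.getD r 0 ∉ pvWin nums l' r ∧
      (∀ j, j < l' → ¬ (pvWin nums j (r + 1)).Nodup) := by
  intro d
  induction d with
  | zero =>
    intro l hd hnd hlr hmin
    -- l = r, window empty, loop exits immediately
    have hl : l = r := by omega
    subst hl
    have hw : pvWin nums l l = [] := by unfold pvWin; simp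
    rw [pvShrinkA]
    have hc : PySem.Set.contains (pvWin nums l l) (nums.getD l 0) = false := by
      rw [hw]; rfl
    rw [hc]
    exact ⟨l, by simp, le_refl l, le_refl l, hnd, by rw [hw]; simp, hmin⟩
  | succ d ih =>
    intro l hd hnd hlr hmin
    rw [pvShrinkA]
    by_cases hc : PySem.Set.contains (pvWin nums l r) (nums.getD r 0) = true
    · rw [hc]
      simp only [if_true]
      have hmem : nums.getD r 0 ∈ pvWin nums l r := (PySem.Set.contains_iff _ _).mp hc
      have hne : pvWin nums l r ≠ [] := by intro h; rw [h] at hmem; exact absurd hmem (List.not_mem_nil)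
      have hlt : l < r := by
        by_contra h
        have : l = r := by omega
        subst this
        apply hne; unfold pvWin; simp
      have hln : l < nums.length := by omega
      have hco : pvWin nums l r = nums.getD l 0 :: pvWin nums (l + 1) r :=
        pvWin_cons nums l r hlt hln
      have hget : PySem.List.pyGetD nums (l : Int) 0 = nums.getD l 0 := by simp
      have hhead : nums.getD l 0 ∈ pvWin nums l r := by rw [hco]; exact List.mem_cons_self
      have hcon2 : PySem.Set.contains (pvWin nums l r) (nums.getD l 0) = true :=
        (PySem.Set.contains_iff _ _).mpr hhead
      have hnotin : nums.getD l 0 ∉ pvWin nums (l + 1) r := by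
        rw [hco] at hnd; exact (List.nodup_cons.mp hnd).1
      have hdisc : PySem.Set.discard (pvWin nums l r) (nums.getD l 0) = pvWin nums (l + 1) r := by
        rw [hco]
        simp only [PySem.Set.discard, List.filter_cons, beq_self_eq_true, Bool.not_true,
          Bool.false_eq_true, if_false]
        apply List.filter_eq_self.mpr
        intro b hb
        simp only [Bool.not_eq_eq_eq_not, Bool.not_true, beq_eq_false_iff_ne, ne_eq]
        intro hba; rw [hba] at hb; exact hnotin hb
      have hrm : PySem.Set.remove? (pvWin nums l r) (PySem.List.pyGetD nums (l : Int) 0) =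
          some (pvWin nums (l + 1) r) := by
        rw [hget]
        simp only [PySem.Set.remove?, hcon2, if_true, hdisc]
      rw [hrm]
      have hnd' : (pvWin nums (l + 1) r).Nodup := by
        rw [hco] at hnd; exact (List.nodup_cons.mp hnd).2
      have hmin' : ∀ j, j < l + 1 → ¬ (pvWin nums j (r + 1)).Nodup := by
        intro j hj
        rcases Nat.lt_or_ge j l with h | h
        · exact hmin j h
        · have : j = l := by omega
          subst this
          rw [pvWin_succ nums j r (by omega) hr]
          exact pvConcat_not_nodup _ _ hmem
      obtain ⟨l', heq, h1, h2, h3, h4, h5⟩ := ih (l + 1) (by omega) hnd' (by omega) hmin'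
      exact ⟨l', heq, by omega, h2, h3, h4, h5⟩
    · rw [Bool.not_eq_true] at hc
      rw [hc]
      simp only [Bool.false_eq_true, if_false]
      refine ⟨l, rfl, le_refl l, hlr, hnd, ?_, hmin⟩
      intro hmem
      rw [← PySem.Set.contains_iff (pvWin nums l r) (nums.getD r 0)] at hmem
      rw [hc] at hmem; exact absurd hmem (by simp)

-- specification of the outer for loop (pvLoopA) under the loop invariant
theorem pvLoop_spec (nums : List Int) (k : Int) :
    ∀ d r l, nums.length - r ≤ d → (pvWin nums l r).Nodup → l ≤ r →
    (∀ j, j < l → ¬ (pvWin nums j r).Nodup) →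
    ((r : Int) - l < k ∨ k ≤ 0) →
    (pvLoopA nums k r (pvWin nums l r) l = true ↔
      (1 ≤ k ∧ ∃ i : Nat, i + k.toNat ≤ nums.length ∧ r < i + k.toNat ∧
        (pvWin nums i (i + k.toNat)).Nodup)) := by
  intro d
  induction d with
  | zero =>
    intro r l hd hnd hlr hmin hsz
    have hr : ¬ r < nums.length := by omega
    rw [pvLoopA, dif_neg hr]
    constructor
    · intro h; exact absurd h (by simp)
    · rintro ⟨hk, i, h1, h2, _⟩; omega
  | succ d ih =>
    intro r l hd hnd hlr hmin hsz
    by_cases hr : r < nums.length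
    · rw [pvLoopA]
      simp only [dif_pos hr, PySem.List.pyGetD_natCast]
      have hmin1 : ∀ j, j < l → ¬ (pvWin nums j (r + 1)).Nodup :=
        fun j hj => pvWin_mono_not_nodup nums j r (hmin j hj)
      obtain ⟨l', heq, hll', hl'r, hnd', hnotin, hmin'⟩ :=
        pvShrink_spec nums r hr (r - l) l (le_refl _) hnd hlr hmin1
      rw [heq]
      by_cases hc : ((r : Int) - (l' : Int) + 1 == k) = true
      · have hkeq : (r : Int) - (l' : Int) + 1 = k := by exact_mod_cast beq_iff_eq.mp hc
        simp only [hc, if_true, true_iff]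
        refine ⟨by omega, l', by omega, by omega, ?_⟩
        have he : l' + k.toNat = r + 1 := by omega
        rw [he, pvWin_succ nums l' r hl'r hr]
        exact pvConcat_nodup _ _ hnd' hnotin
      · rw [Bool.not_eq_true] at hc
        have hkne : (r : Int) - (l' : Int) + 1 ≠ k := by
          intro h; rw [← h] at hc; simp at hc
        simp only [hc, Bool.false_eq_true, if_false]
        have hadd : PySem.Set.add (pvWin nums l' r) (nums.getD r 0) = pvWin nums l' (r + 1) := by
          rw [PySem.Set.add_of_not_mem hnotin, pvWin_succ nums l' r hl'r hr]
        have hnd'' : (pvWin nums l' (r + 1)).Nodup := by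
          rw [pvWin_succ nums l' r hl'r hr]
          exact pvConcat_nodup _ _ hnd' hnotin
        have hsz' : ((r + 1 : Nat) : Int) - l' < k ∨ k ≤ 0 := by
          rcases hsz with h | h
          · left; push_cast; omega
          · right; exact h
        rw [hadd, ih (r + 1) l' (by omega) hnd'' (by omega) hmin' hsz']
        constructor
        · rintro ⟨hk1, i, h1, h2, h3⟩
          exact ⟨hk1, i, h1, by omega, h3⟩
        · rintro ⟨hk1, i, h1, h2, h3⟩
          refine ⟨hk1, i, h1, ?_, h3⟩
          by_contra hx
          have hieq : i + k.toNat = r + 1 := by omega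
          rw [hieq] at h3
          have hige : l' ≤ i := by
            by_contra hy
            exact hmin' i (by omega) h3
          exfalso
          rcases hsz with h | h
          · omega
          · omega
    · rw [pvLoopA, dif_neg hr]
      constructor
      · intro h; exact absurd h (by simp)
      · rintro ⟨hk, i, h1, h2, _⟩; omega

-- B-side: the dict is an exact frequency counter of the current window
def pvIsCtr (c : PySem.Dict Int Int) (W : List Int) : Prop :=
  c.keys.Nodup ∧ (∀ v, PySem.Dict.getD c v 0 = (W.count v : Int)) ∧ (∀ v, v ∈ c.keys ↔ v ∈ W)

theorem pvFind_filter (l : List (Int × Int)) (v k : Int) (hvk : v ≠ k) :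
    List.find? (fun p => p.1 == v) (l.filter (fun p => !p.1 == k)) =
      List.find? (fun p => p.1 == v) l := by
  induction l with
  | nil => rfl
  | cons a l ih =>
    by_cases ha : a.1 = k
    · have h1 : (!a.1 == k) = false := by simp [ha]
      have h2 : (a.1 == v) = false := by simp [ha]; omega
      rw [List.filter_cons, h1]
      simp only [Bool.false_eq_true, if_false, List.find?_cons, h2]
      exact ih
    · have h1 : (!a.1 == k) = true := by simp [ha]
      rw [List.filter_cons, h1]
      simp only [if_true, List.find?_cons]
      cases hav : (a.1 == v) with
      | true => rfl
      | false => exact ih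

theorem pvGet?_erase (d : PySem.Dict Int Int) (k v : Int) :
    (PySem.Dict.erase d k).get? v = if v = k then none else d.get? v := by
  split_ifs with hvk
  · subst hvk
    simp only [PySem.Dict.erase, PySem.Dict.get?, Option.map_eq_none_iff]
    rw [List.find?_eq_none]
    intro p hp
    simp only [List.mem_filter] at hp
    simpa using hp.2
  · simp only [PySem.Dict.erase, PySem.Dict.get?]
    rw [pvFind_filter d.items v k hvk]

theorem pvGetD_erase (d : PySem.Dict Int Int) (k v : Int) :
    PySem.Dict.getD (PySem.Dict.erase d k) v 0 = if v = k then 0 else PySem.Dict.getD d v 0 := by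
  simp only [PySem.Dict.getD, pvGet?_erase]
  split_ifs <;> rfl

theorem pvKeys_erase_mem (d : PySem.Dict Int Int) (k v : Int) :
    v ∈ (PySem.Dict.erase d k).keys ↔ v ∈ d.keys ∧ v ≠ k := by
  simp only [PySem.Dict.erase, PySem.Dict.keys, List.mem_map, List.mem_filter]
  constructor
  · rintro ⟨p, ⟨hp, hpk⟩, rfl⟩
    exact ⟨⟨p, hp, rfl⟩, by simpa using hpk⟩
  · rintro ⟨⟨p, hp, rfl⟩, hvk⟩
    exact ⟨p, ⟨hp, by simpa using hvk⟩, rfl⟩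

theorem pvKeys_erase_nodup (d : PySem.Dict Int Int) (k : Int) (h : d.keys.Nodup) :
    (PySem.Dict.erase d k).keys.Nodup := by
  simp only [PySem.Dict.erase, PySem.Dict.keys]
  exact h.sublist (List.Sublist.map _ (List.filter_sublist))

theorem pvKeys_modify_mem (d : PySem.Dict Int Int) (x v : Int) (f : Int → Int) :
    v ∈ (PySem.Dict.modify d x 0 f).keys ↔ v = x ∨ v ∈ d.keys := by
  rw [PySem.Dict.keys_modify]
  simp [PySem.Dict.mem_keys_insert]

theorem pvKeys_modify_nodup (d : PySem.Dict Int Int) (x : Int) (f : Int → Int)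
    (h : d.keys.Nodup) : (PySem.Dict.modify d x 0 f).keys.Nodup := by
  rw [show (PySem.Dict.modify d x 0 f).keys = (d.insert x (f (d.getD x 0))).keys from
    PySem.Dict.keys_modify d x 0 f]
  exact PySem.Dict.nodup_keys_insert d x _ h

-- adding the entering element of the window
theorem pvCtr_add (c : PySem.Dict Int Int) (W : List Int) (x : Int) (h : pvIsCtr c W) :
    pvIsCtr (PySem.Dict.modify c x 0 (· + 1)) (W ++ [x]) := by
  obtain ⟨hnd, hcnt, hmem⟩ := h
  refine ⟨pvKeys_modify_nodup c x _ hnd, ?_, ?_⟩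
  · intro v
    rw [PySem.Dict.getD_modify]
    split_ifs with hv
    · subst hv; rw [hcnt v]; simp [List.count_append]
    · rw [hcnt v]
      have h2 : ¬ (x = v) := fun h => hv h.symm
      simp [List.count_append, h2]
  · intro v
    rw [pvKeys_modify_mem]
    simp only [List.mem_append, List.mem_singleton]
    rw [hmem v]
    tauto

-- evicting the leaving element of the window
theorem pvCtr_del (c : PySem.Dict Int Int) (W : List Int) (y : Int) (h : pvIsCtr c (y :: W)) :
    pvIsCtr
      (if PySem.Dict.getD (PySem.Dict.modify c y 0 (· - 1)) y 0 == 0 then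
        PySem.Dict.erase (PySem.Dict.modify c y 0 (· - 1)) y
      else PySem.Dict.modify c y 0 (· - 1)) W := by
  obtain ⟨hnd, hcnt, hmem⟩ := h
  have hgd : ∀ v, PySem.Dict.getD (PySem.Dict.modify c y 0 (· - 1)) v 0 = (W.count v : Int) ∨
      (v = y ∧ PySem.Dict.getD (PySem.Dict.modify c y 0 (· - 1)) v 0 = (W.count v : Int)) := by
    intro v; left
    rw [PySem.Dict.getD_modify]
    split_ifs with hv
    · subst hv; rw [hcnt v]; simp
    · rw [hcnt v]
      have h2 : ¬ (y = v) := fun h => hv h.symm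
      simp [h2]
  have hgd' : ∀ v, PySem.Dict.getD (PySem.Dict.modify c y 0 (· - 1)) v 0 = (W.count v : Int) := by
    intro v; rcases hgd v with h | ⟨_, h⟩ <;> exact h
  split_ifs with hz
  · -- count dropped to zero: y removed from dict, and y ∉ W
    have hyW : y ∉ W := by
      have := hgd' y
      rw [beq_iff_eq] at hz
      rw [hz] at this
      intro hy
      have := List.count_pos_iff.mpr hy
      omega
    refine ⟨pvKeys_erase_nodup _ y (pvKeys_modify_nodup c y _ hnd), ?_, ?_⟩
    · intro v
      rw [pvGetD_erase]
      split_ifs with hv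
      · subst hv
        rw [List.count_eq_zero.mpr hyW]
        rfl
      · exact hgd' v
    · intro v
      rw [pvKeys_erase_mem, pvKeys_modify_mem]
      constructor
      · rintro ⟨hv, hvy⟩
        rcases hv with rfl | hv
        · exact absurd rfl hvy
        · rcases List.mem_cons.mp ((hmem v).mp hv) with h | h
          · exact absurd h hvy
          · exact h
      · intro hv
        have hvy : v ≠ y := fun h => hyW (h ▸ hv)
        exact ⟨Or.inr ((hmem v).mpr (List.mem_cons_of_mem y hv)), hvy⟩
  · -- y still occurs in the remaining window
    have hyW : y ∈ W := by
      have := hgd' y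
      rw [beq_iff_eq] at hz  -- hz : ¬ (getD ... = 0)
      by_contra hy
      have : W.count y = 0 := List.count_eq_zero.mpr hy
      rw [hgd' y, this] at hz
      exact hz rfl
    refine ⟨pvKeys_modify_nodup c y _ hnd, hgd', ?_⟩
    intro v
    rw [pvKeys_modify_mem]
    constructor
    · rintro (rfl | hv)
      · exact hyW
      · rcases List.mem_cons.mp ((hmem v).mp hv) with h | h
        · exact h ▸ hyW
        · exact h
    · intro hv
      exact Or.inr ((hmem v).mpr (List.mem_cons_of_mem y hv))

theorem pvCtr_size (c : PySem.Dict Int Int) (W : List Int) (h : pvIsCtr c W) :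
    PySem.Dict.size c = (PySem.Set.ofList W).length := by
  obtain ⟨hnd, _, hmem⟩ := h
  have hkl : PySem.Dict.size c = c.keys.length := by
    simp [PySem.Dict.size, PySem.Dict.keys]
  rw [hkl]
  refine List.Perm.length_eq ?_
  rw [List.perm_ext_iff_of_nodup hnd (PySem.Set.nodup_ofList W)]
  intro a
  rw [hmem a, PySem.Set.mem_ofList]

-- one iteration's tail: the size test at index r, then the recursive call
theorem pvLoopB_step (nums : List Int) (k : Int) (hk : 1 ≤ k) (r : Nat)
    (c2 : PySem.Dict Int Int) (hr : r < nums.length) (hrn : nums.length - (r + 1) ≤ dFuel)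
    (hc2 : pvIsCtr c2 (pvWin nums (r + 1 - k.toNat) (r + 1)))
    (ih : ∀ r' c', nums.length - r' ≤ dFuel → pvIsCtr c' (pvWin nums (r' - k.toNat) r') →
      (pvLoopB nums k r' c' = true ↔
        ∃ i : Nat, i + k.toNat ≤ nums.length ∧ r' < i + k.toNat ∧
          (pvWin nums i (i + k.toNat)).Nodup)) :
    ((if (decide (k - 1 ≤ (r : Int)) && ((PySem.Dict.size c2 : Int) == k)) then true
      else pvLoopB nums k (r + 1) c2) = true ↔
      ∃ i : Nat, i + k.toNat ≤ nums.length ∧ r < i + k.toNat ∧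
        (pvWin nums i (i + k.toNat)).Nodup) := by
  have hsz : PySem.Dict.size c2 = (PySem.Set.ofList (pvWin nums (r + 1 - k.toNat) (r + 1))).length :=
    pvCtr_size _ _ hc2
  by_cases hP : k - 1 ≤ (r : Int) ∧ (PySem.Dict.size c2 : Int) = k
  · have hb : (decide (k - 1 ≤ (r : Int)) && ((PySem.Dict.size c2 : Int) == k)) = true := by
      simp [hP.1, hP.2]
    rw [hb, if_pos rfl]
    have hkr1 : k.toNat ≤ r + 1 := by omega
    have hwl : (pvWin nums (r + 1 - k.toNat) (r + 1)).length = k.toNat := by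
      rw [pvWin_len nums _ _ (by omega)]; omega
    have hnd : (pvWin nums (r + 1 - k.toNat) (r + 1)).Nodup := by
      apply (pvLenOfList _).mp
      rw [hwl, ← hsz]
      omega
    constructor
    · intro _
      refine ⟨r + 1 - k.toNat, by omega, by omega, ?_⟩
      have he : r + 1 - k.toNat + k.toNat = r + 1 := by omega
      rw [he]
      exact hnd
    · intro _; rfl
  · have hb : (decide (k - 1 ≤ (r : Int)) && ((PySem.Dict.size c2 : Int) == k)) = false := by
      rcases Decidable.not_and_iff_not_or_not.mp hP with h | h <;> simp [h]
    rw [hb]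
    simp only [Bool.false_eq_true, if_false]
    rw [ih (r + 1) c2 hrn hc2]
    constructor
    · rintro ⟨i, h1, h2, h3⟩
      exact ⟨i, h1, by omega, h3⟩
    · rintro ⟨i, h1, h2, h3⟩
      by_cases hcase : r + 1 < i + k.toNat
      · exact ⟨i, h1, hcase, h3⟩
      · exfalso
        have hieq : i + k.toNat = r + 1 := by omega
        have hie : i = r + 1 - k.toNat := by omega
        rw [hieq, hie] at h3
        apply hP
        constructor
        · omega
        · rw [hsz, PySem.Set.ofList_eq_self_of_nodup _ h3,
            pvWin_len nums _ _ (by omega)]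
          omega

theorem pvLoopB_spec (nums : List Int) (k : Int) (hk : 1 ≤ k) :
    ∀ d r c, nums.length - r ≤ d → pvIsCtr c (pvWin nums (r - k.toNat) r) →
    (pvLoopB nums k r c = true ↔
      ∃ i : Nat, i + k.toNat ≤ nums.length ∧ r < i + k.toNat ∧
        (pvWin nums i (i + k.toNat)).Nodup) := by
  intro d
  induction d with
  | zero =>
    intro r c hd hc
    have hr : ¬ r < nums.length := by omega
    rw [pvLoopB, dif_neg hr]
    constructor
    · intro h; exact absurd h (by simp)
    · rintro ⟨i, h1, h2, -⟩; omega
  | succ d ih =>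
    intro r c hd hc
    by_cases hr : r < nums.length
    · rw [pvLoopB]
      simp only [dif_pos hr, PySem.List.pyGetD_natCast]
      have hsle : r - k.toNat ≤ r := Nat.sub_le r k.toNat
      have hstep : pvWin nums (r - k.toNat) (r + 1) =
          pvWin nums (r - k.toNat) r ++ [nums.getD r 0] :=
        pvWin_succ nums (r - k.toNat) r hsle hr
      have hc1 : pvIsCtr (PySem.Dict.modify c (nums.getD r 0) 0 (· + 1))
          (pvWin nums (r - k.toNat) (r + 1)) := by
        rw [hstep]; exact pvCtr_add c _ _ hc
      by_cases hkr : k ≤ (r : Int)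
      · simp only [if_pos hkr]
        have hkn : k.toNat ≤ r := by omega
        have hye : (r : Int) - k = ((r - k.toNat : Nat) : Int) := by omega
        rw [hye, PySem.List.pyGetD_natCast]
        have hcons : pvWin nums (r - k.toNat) (r + 1) =
            nums.getD (r - k.toNat) 0 :: pvWin nums (r - k.toNat + 1) (r + 1) :=
          pvWin_cons nums (r - k.toNat) (r + 1) (by omega) (by omega)
        have hc2 : pvIsCtr
            (if (PySem.Dict.modify (PySem.Dict.modify c (nums.getD r 0) 0 (· + 1))
                  (nums.getD (r - k.toNat) 0) 0 (· - 1)).getD (nums.getD (r - k.toNat) 0) 0 == 0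
              then
                PySem.Dict.erase (PySem.Dict.modify (PySem.Dict.modify c (nums.getD r 0) 0 (· + 1))
                  (nums.getD (r - k.toNat) 0) 0 (· - 1)) (nums.getD (r - k.toNat) 0)
              else PySem.Dict.modify (PySem.Dict.modify c (nums.getD r 0) 0 (· + 1))
                (nums.getD (r - k.toNat) 0) 0 (· - 1))
            (pvWin nums (r + 1 - k.toNat) (r + 1)) := by
          have he : r + 1 - k.toNat = r - k.toNat + 1 := by omega
          rw [he]
          refine pvCtr_del _ _ _ ?_
          rw [← hcons]
          exact hc1
        exact pvLoopB_step nums k hk r _ hr (by omega) hc2 ih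
      · simp only [if_neg hkr]
        have hc2 : pvIsCtr (PySem.Dict.modify c (nums.getD r 0) 0 (· + 1))
            (pvWin nums (r + 1 - k.toNat) (r + 1)) := by
          have he : r + 1 - k.toNat = r - k.toNat := by omega
          rw [he]; exact hc1
        exact pvLoopB_step nums k hk r _ hr (by omega) hc2 ih
    · rw [pvLoopB, dif_neg hr]
      constructor
      · intro h; exact absurd h (by simp)
      · rintro ⟨i, h1, h2, -⟩; omega

theorem pvB_iff (nums : List Int) (k : Int) :
    has_unique_window_alt nums k = true ↔
      (1 ≤ k ∧ ∃ i : Nat, i + k.toNat ≤ nums.length ∧ (pvWin nums i (i + k.toNat)).Nodup) := by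
  unfold has_unique_window_alt
  split_ifs with hk
  · constructor
    · intro h; exact absurd h (by simp)
    · rintro ⟨h1, -⟩; omega
  · have hk1 : 1 ≤ k := by omega
    have hc0 : pvIsCtr PySem.Dict.empty (pvWin nums (0 - k.toNat) 0) := by
      refine ⟨by simp [PySem.Dict.empty, PySem.Dict.keys], ?_, ?_⟩
      · intro v
        show (PySem.Dict.empty : PySem.Dict Int Int).getD v 0 = _
        rw [PySem.Dict.getD_empty]
        simp [pvWin]
      · intro v
        simp [PySem.Dict.empty, PySem.Dict.keys, pvWin]
    rw [pvLoopB_spec nums k hk1 nums.length 0 PySem.Dict.empty (by omega) hc0]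
    constructor
    · rintro ⟨i, h1, -, h3⟩
      exact ⟨hk1, i, h1, h3⟩
    · rintro ⟨-, i, h1, h3⟩
      exact ⟨i, h1, by omega, h3⟩

theorem pvA_iff (nums : List Int) (k : Int) :
    has_unique_window nums k = true ↔
      (1 ≤ k ∧ ∃ i : Nat, i + k.toNat ≤ nums.length ∧ (pvWin nums i (i + k.toNat)).Nodup) := by
  unfold has_unique_window
  rw [show (PySem.Set.empty : PySem.Set Int) = pvWin nums 0 0 from rfl]
  rw [pvLoop_spec nums k nums.length 0 0 (by omega) (by unfold pvWin; simp) (by omega)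
    (fun j hj => absurd hj (by omega)) (by omega)]
  constructor
  · rintro ⟨hk1, i, h1, -, h3⟩
    exact ⟨hk1, i, h1, h3⟩
  · rintro ⟨hk1, i, h1, h3⟩
    exact ⟨hk1, i, h1, by omega, h3⟩

-- ===== VERDICT (by name: the statement is the Claim_ definition above) =====
theorem has_unique_window_spec : Claim_equal_has_unique_window := by
  intro nums k _
  unfold Spec_has_unique_window
  have hA := pvA_iff nums k
  have hB := pvB_iff nums k
  cases hb : has_unique_window_alt nums k with
  | true => exact hA.mpr (hB.mp hb)
  | false =>
    cases ha : has_unique_window nums k with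
    | true => rw [hb.symm.trans (hB.mpr (hA.mp ha))]
    | false => rfl
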